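-- pv_equiv track=rewrite | github.com/RedisOptimal/codewars | codewars/2kyu/Whitespace_Interpreter/solution.py | feed_number
-- ===== SOURCE A (Python) =====
-- def feed_number(codeSegment, offset):
--     number = 0
--     if codeSegment[offset] == 'n':
--         raise Exception("The expression of just [terminal] should throw an error.")
--
--     ch = codeSegment[offset]
--     offset += 1
--     sign = -1 if ch == 't' else 1
--
--     while offset < len(codeSegment):
--         ch = codeSegment[offset]
--         offset += 1
--         if ch == 'n': break
--         number = number * 2 + (1 if ch == 't' else 0)
--
--     return (sign * number, offset)
-- ===== SOURCE B (Python) =====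
-- def feed_number(codeSegment, offset):
--     if codeSegment[offset] == 'n':
--         raise Exception("The expression of just [terminal] should throw an error.")
--     sign = -1 if codeSegment[offset] == 't' else 1
--     end = codeSegment.find('n', offset + 1)
--     if end == -1:
--         bits = codeSegment[offset + 1:]
--         new_offset = len(codeSegment)
--     else:
--         bits = codeSegment[offset + 1:end]
--         new_offset = end + 1
--     number = sum(1 << i for i, c in enumerate(reversed(bits)) if c == 't')
--     return (sign * number, new_offset)
-- ===== Notes on version B (the rewrite author's own statement) =====
-- stated objective: simpler
-- what changed: A's char-by-char while loop with a Horner accumulator is replaced by finding the terminal with str.find, slicing out the bit string, and summing positional powers of two over it (find/slice run in C, removing most per-character interpreter work).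
-- outside the precondition, e.g. on feed_number('ts', -2): A returns (-2, 2), B returns (0, 2)
import Mathlib
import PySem

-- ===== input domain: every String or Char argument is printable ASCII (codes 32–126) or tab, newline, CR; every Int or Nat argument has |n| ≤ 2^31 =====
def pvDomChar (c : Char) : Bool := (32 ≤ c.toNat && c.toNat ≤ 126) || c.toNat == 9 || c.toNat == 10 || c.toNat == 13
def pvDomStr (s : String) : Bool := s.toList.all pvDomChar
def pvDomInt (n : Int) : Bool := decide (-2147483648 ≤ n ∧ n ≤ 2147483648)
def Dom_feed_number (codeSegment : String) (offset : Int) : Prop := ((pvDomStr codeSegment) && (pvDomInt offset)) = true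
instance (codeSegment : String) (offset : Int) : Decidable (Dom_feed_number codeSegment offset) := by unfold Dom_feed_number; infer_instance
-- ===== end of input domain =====

-- B replaces A's char-by-char Horner accumulator loop with find-the-terminal + slice + a positional
-- power-of-two sum over the bit slice (simpler decomposition; a timing run measured it faster).

-- ===== PORT A =====
-- the while loop of A: reads characters one at a time, Horner-accumulating, stopping at 'n'
def feedLoop : List Char → Int → Int → Int × Int
  | [], number, offset => (number, offset)
  | c :: rest, number, offset =>
    if c = 'n' then (number, offset + 1)
    else feedLoop rest (number * 2 + (if c = 't' then 1 else 0)) (offset + 1)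

def feed_number (codeSegment : String) (offset : Int) : Int × Int :=
  match PySem.Str.pyGet? codeSegment offset with
  | none => (0, 0)          -- IndexError (offset out of range): outside Pre_
  | some ch =>
    if ch = 'n' then (0, 0) -- explicit raise in A: outside Pre_
    else
      let sign : Int := if ch = 't' then -1 else 1
      -- the while loop walks indices offset+1, offset+2, …: exact as recursion over the
      -- dropped suffix since Pre_ guarantees 0 ≤ offset
      let r := feedLoop (codeSegment.toList.drop (offset + 1).toNat) 0 (offset + 1)
      (sign * r.1, r.2)

-- ===== PORT B =====
def feed_number_alt (codeSegment : String) (offset : Int) : Int × Int :=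
  match PySem.Str.pyGet? codeSegment offset with
  | none => (0, 0)          -- IndexError: outside Pre_
  | some ch =>
    if ch = 'n' then (0, 0) -- explicit raise in B: outside Pre_
    else
      let sign : Int := if ch = 't' then -1 else 1
      let e := PySem.Str.findFrom codeSegment "n" (offset + 1) none
      let p :=
        if e = -1 then
          (PySem.List.slice codeSegment.toList (some (offset + 1)) none,
           (codeSegment.toList.length : Int))
        else
          (PySem.List.slice codeSegment.toList (some (offset + 1)) (some e), e + 1)
      -- sum(1 << i for i, c in enumerate(reversed(bits)) if c == 't')
      let number := (PySem.List.enumerate p.1.reverse 0).foldl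
        (fun acc q => if q.2 = 't' then acc + 2 ^ q.1.toNat else acc) 0
      (sign * number, p.2)

-- ===== PRECONDITION & SPEC =====
-- Pre_ restricts to the natural domain 0 ≤ offset < len(codeSegment) and excludes offset pointing at
-- 'n' (there A raises its explicit Exception); a negative in-range offset, on which A returns a value
-- produced by Python's index wraparound re-reading the string's tail, is outside the natural domain
-- and excluded too.
def Pre_feed_number (codeSegment : String) (offset : Int) : Prop :=
  0 ≤ offset ∧ offset < codeSegment.toList.length ∧
    codeSegment.toList.getD offset.toNat 'n' ≠ 'n'
instance (codeSegment : String) (offset : Int) : Decidable (Pre_feed_number codeSegment offset) := by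
  unfold Pre_feed_number; infer_instance
def pvWitness_feed_number : String × Int := ("s tstn st", 2)
def Spec_feed_number (codeSegment : String) (offset : Int) (out : Int × Int) : Prop :=
  out = feed_number_alt codeSegment offset
instance (codeSegment : String) (offset : Int) (out : Int × Int) : Decidable (Spec_feed_number codeSegment offset out) := by
  unfold Spec_feed_number; infer_instance

-- ===== CLAIM (what is proved, stated in full; the proofs are below) =====
def Claim_equal_feed_number : Prop := ∀ (codeSegment : String) (offset : Int),
  Dom_feed_number codeSegment offset → Pre_feed_number codeSegment offset →
  Spec_feed_number codeSegment offset (feed_number codeSegment offset)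

-- ===== LEMMAS AND PROOFS =====

-- little-endian value of a bit list ('t' = 1, anything else = 0)
def lepV : List Char → Int
  | [] => 0
  | c :: l => (if c = 't' then 1 else 0) + 2 * lepV l

theorem lepV_append_singleton (l : List Char) (c : Char) :
    lepV (l ++ [c]) = lepV l + 2 ^ l.length * (if c = 't' then 1 else 0) := by
  induction l with
  | nil => simp [lepV]
  | cons d l ih =>
      simp [lepV, ih, pow_succ]
      split_ifs <;> ring

theorem horner_lep (l : List Char) (num : Int) :
    l.foldl (fun a c => a * 2 + (if c = 't' then 1 else 0)) num
      = num * 2 ^ l.length + lepV l.reverse := by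
  induction l generalizing num with
  | nil => simp [lepV]
  | cons c l ih =>
      simp only [List.foldl_cons, ih, List.reverse_cons, lepV_append_singleton,
        List.length_reverse, List.length_cons]
      ring

theorem enumFold (xs : List Char) (s : Nat) (acc : Int) :
    (PySem.List.enumerate xs (s : Int)).foldl
        (fun acc q => if q.2 = 't' then acc + 2 ^ q.1.toNat else acc) acc
      = acc + 2 ^ s * lepV xs := by
  induction xs generalizing s acc with
  | nil => simp [PySem.List.enumerate, lepV]
  | cons c l ih =>
      rw [PySem.List.enumerate_cons]
      have hcast : (s : Int) + 1 = ((s + 1 : Nat) : Int) := by push_cast; ring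
      simp only [List.foldl_cons, hcast, ih, lepV, Int.toNat_natCast]
      split <;> simp [pow_succ] <;> ring

theorem feedLoop_spec (l : List Char) (num off : Int) :
    feedLoop l num off =
      ((l.take (l.findIdx (· == 'n'))).foldl
          (fun a c => a * 2 + (if c = 't' then 1 else 0)) num,
        off + l.findIdx (· == 'n') + (if l.findIdx (· == 'n') < l.length then 1 else 0)) := by
  induction l generalizing num off with
  | nil => simp [feedLoop]
  | cons c l ih =>
      by_cases hc : c = 'n'
      · subst hc
        simp [feedLoop, List.findIdx_cons]
      · have hbeq : (c == 'n') = false := by simp [hc]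
        have hfi : (c :: l).findIdx (· == 'n') = l.findIdx (· == 'n') + 1 := by
          simp [List.findIdx_cons, hbeq]
        rw [show feedLoop (c :: l) num off
              = feedLoop l (num * 2 + (if c = 't' then 1 else 0)) (off + 1) by
            simp [feedLoop, hc]]
        rw [ih, hfi]
        simp only [Prod.mk.injEq, List.take_succ_cons, List.foldl_cons, List.length_cons]
        refine ⟨by trivial, ?_⟩
        push_cast
        split_ifs with h1 h2 h2 <;> omega

-- [a] is a prefix of xs iff xs starts with a
theorem singleton_prefix_iff (a : Char) (xs : List Char) :
    [a] <+: xs ↔ xs.head? = some a := by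
  cases xs with
  | nil => simp
  | cons b t =>
      constructor
      · rintro ⟨r, hr⟩
        simp only [List.cons_append, List.nil_append, List.cons.injEq] at hr
        simp [hr.1]
      · intro h
        simp only [List.head?_cons, Option.some.injEq] at h
        exact ⟨t, by simp [h]⟩

theorem singleton_prefix_drop (l : List Char) (i : Nat) :
    ['n'] <+: l.drop i ↔ l[i]? = some 'n' := by
  rw [singleton_prefix_iff, List.head?_drop]

-- Chars.find on the singleton ['n'] is findIdx (or -1 when absent)
theorem find_singleton_n (l : List Char) :
    PySem.Chars.find l ['n'] =
      if 'n' ∈ l then (l.findIdx (· == 'n') : Int) else -1 := by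
  by_cases hm : 'n' ∈ l
  · have hinf : ['n'] <:+: l := by
      obtain ⟨s, t, rfl⟩ := List.append_of_mem hm
      exact ⟨s, t, by simp⟩
    have h0 : 0 ≤ PySem.Chars.find l ['n'] := (PySem.Chars.find_nonneg_iff l ['n']).mpr hinf
    obtain ⟨hpre, hmin⟩ := PySem.Chars.find_spec h0
    set f := (PySem.Chars.find l ['n']).toNat with hf
    have hfp : l[f]? = some 'n' := (singleton_prefix_drop l f).mp hpre
    obtain ⟨hflt, hfe⟩ := List.getElem?_eq_some_iff.mp hfp
    have hle1 : l.findIdx (· == 'n') ≤ f := by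
      by_contra hcon
      have := List.not_of_lt_findIdx (p := (· == 'n')) (xs := l) (i := f) (by omega)
      simp only [beq_eq_false_iff_ne] at this
      exact this hfe
    have hle2 : f ≤ l.findIdx (· == 'n') := by
      by_contra hcon
      have hklt : l.findIdx (· == 'n') < l.length := by omega
      have hpk : (l[l.findIdx (· == 'n')] == 'n') = true :=
        List.findIdx_getElem (w := hklt)
      have : ['n'] <+: l.drop (l.findIdx (· == 'n')) := by
        rw [singleton_prefix_drop, List.getElem?_eq_getElem hklt]
        simpa using hpk
      exact hmin _ (by omega) this
    have : f = l.findIdx (· == 'n') := by omega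
    rw [if_pos hm, ← this, hf, Int.toNat_of_nonneg h0]
  · rw [if_neg hm, (PySem.Chars.find_eq_neg_one_iff l ['n'])]
    intro hinf
    exact hm (hinf.subset (by simp))

theorem feed_number_spec : Claim_equal_feed_number := by
  intro cs off _ hpre
  obtain ⟨h0, hlenI, hch⟩ := hpre
  unfold Spec_feed_number feed_number feed_number_alt
  have hlt : off.toNat < cs.toList.length := by omega
  have hget : PySem.Str.pyGet? cs off = some (cs.toList[off.toNat]) := by
    have h := PySem.Str.pyGet?_natCast cs off.toNat
    rw [Int.toNat_of_nonneg h0] at h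
    rw [h, List.getElem?_eq_getElem hlt]
  have hchar : ¬ (cs.toList[off.toNat] = 'n') := by
    rwa [List.getD_eq_getElem?_getD, List.getElem?_eq_getElem hlt] at hch
  set j := off.toNat + 1 with hjdef
  have hj1 : off + 1 = (j : Int) := by omega
  have hjle : j ≤ cs.toList.length := hlt
  have hdrop : (off + 1).toNat = j := by omega
  set rest := cs.toList.drop j with hrestdef
  have hrlen : rest.length = cs.toList.length - j := by
    rw [hrestdef, List.length_drop]
  have hfind : PySem.Str.findFrom cs "n" (off + 1) none
      = if PySem.Chars.find rest ['n'] = -1 then -1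
        else (j : Int) + PySem.Chars.find rest ['n'] := by
    rw [PySem.Str.findFrom_eq, hj1, show ("n".toList) = ['n'] from rfl]
    exact PySem.Chars.findFrom_natCast _ _ j hjle
  rw [hget]
  simp only [hfind, if_neg hchar, hdrop, ← hrestdef, feedLoop_spec, find_singleton_n]
  set k := rest.findIdx (· == 'n') with hkdef
  by_cases hm : 'n' ∈ rest
  · have hklt : k < rest.length := List.findIdx_lt_length.mpr ⟨'n', hm, by simp⟩
    rw [if_pos hm]
    have hk1 : ¬ ((k : Int) = -1) := by omega
    have hk2 : ¬ ((j : Int) + (k : Int) = -1) := by omega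
    rw [if_neg hk1, if_neg hk2]
    have hb : (j : Int) + (k : Int) = ((j + k : Nat) : Int) := by push_cast; ring
    have hbits : PySem.List.slice cs.toList (some (off + 1)) (some ((j : Int) + (k : Int)))
        = rest.take k := by
      rw [hj1, hb, PySem.List.slice_natCast]
      congr 1
      omega
    simp only [hbits]
    rw [horner_lep, show (0 : Int) = ((0 : Nat) : Int) from rfl, enumFold]
    simp only [Prod.mk.injEq]
    constructor
    · ring
    · rw [if_pos hklt]
      omega
  · rw [if_neg hm, if_pos rfl, if_pos rfl]
    have hkeq : k = rest.length := by
      rw [hkdef]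
      exact List.findIdx_eq_length.mpr (fun x hx => by
        simp only [beq_eq_false_iff_ne]
        rintro rfl
        exact hm hx)
    have hbits : PySem.List.slice cs.toList (some (off + 1)) none = rest := by
      rw [PySem.List.slice_from _ (by omega), hdrop]
    simp only [hbits]
    rw [horner_lep, show (0 : Int) = ((0 : Nat) : Int) from rfl, enumFold]
    simp only [Prod.mk.injEq]
    constructor
    · rw [hkeq, List.take_length]
      push_cast
      ring
    · rw [hkeq, if_neg (lt_irrefl _)]
      omega
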